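-- pv_equiv track=rewrite | github.com/hivdb/GenBankRefs | Alignment.py | get_ref_codon_list
-- ===== SOURCE A (Python) =====
-- def get_ref_codon_list(aligned_ref):
--     ref_codon_list = []
--     ref_codon = []
--
--     for idx, r in enumerate(aligned_ref):
--         ref_codon.append(r)
--         codon_core = ''.join(ref_codon).replace('-', '')
--         if len(codon_core) == 3:
--             ref_codon = ''.join(ref_codon)
--
--             # Move prefix deletion to previous codon
--             codon_pre = ref_codon[:get_pos_pre(ref_codon, '-')]
--             this_codon = ref_codon[get_pos_pre(ref_codon, '-'):]
--             # codon_post = ref_codon[get_pos_post(ref_codon, '-'):]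
--             if codon_pre:
--                 if ref_codon_list:
--                     ref_codon_list[-1] += codon_pre
--                 else:
--                     this_codon = ref_codon
--
--             ref_codon_list.append(this_codon)
--
--             ref_codon = []
--
--     return ref_codon_list
--
-- def get_pos_pre(str, char):
--     pos = 0
--     for c in str:
--         if c == char:
--             pos += 1
--         else:
--             break
--     return pos
-- ===== SOURCE B (Python) =====
-- def get_ref_codon_list(aligned_ref):
--     # Staged: (1) compute cut indices after every 3rd non-dash char, (2) slice
--     # into raw chunks, (3) shift each chunk's leading-dash run onto the previous one.
--     cuts = []
--     n = 0
--     for i, ch in enumerate(aligned_ref):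
--         if ch != '-':
--             n += 1
--             if n % 3 == 0:
--                 cuts.append(i + 1)
--     chunks = [aligned_ref[a:b] for a, b in zip([0] + cuts, cuts)]
--     out = []
--     for chunk in chunks:
--         stripped = chunk.lstrip('-')
--         if out and stripped != chunk:
--             out[-1] += chunk[:len(chunk) - len(stripped)]
--             out.append(stripped)
--         else:
--             out.append(chunk)
--     return out
-- ===== Notes on version B (the rewrite author's own statement) =====
-- stated objective: faster
-- what changed: B is staged: one indexed pass collects the cut positions after every 3rd non-dash character, the chunks are produced by slicing at those cuts, and a separate second pass moves each chunk's leading-dash run onto the previous chunk, instead of A's single fused loop that rejoins and dash-strips the whole growing buffer at every character.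
import Mathlib
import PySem

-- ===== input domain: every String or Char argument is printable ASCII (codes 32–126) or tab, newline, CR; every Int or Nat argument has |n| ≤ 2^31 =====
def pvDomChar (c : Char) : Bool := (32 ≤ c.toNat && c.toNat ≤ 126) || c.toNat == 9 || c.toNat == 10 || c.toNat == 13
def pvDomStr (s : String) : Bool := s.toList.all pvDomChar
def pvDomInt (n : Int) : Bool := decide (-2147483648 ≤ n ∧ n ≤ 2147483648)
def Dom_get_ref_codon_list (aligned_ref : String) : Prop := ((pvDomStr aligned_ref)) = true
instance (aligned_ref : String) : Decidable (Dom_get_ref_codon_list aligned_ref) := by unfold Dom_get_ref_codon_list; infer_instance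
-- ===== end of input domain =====

-- B is staged (cut indices, slicing, then a prefix-shifting pass) instead of A's fused loop
-- that rejoins/dash-strips its whole buffer per character: O(n) instead of O(n·k).

-- ===== PORT A =====
-- helper get_pos_pre: Python loop with break = count of leading chars equal to `char`
def get_pos_pre (s : List Char) (char : Char) : Nat :=
  match s with
  | [] => 0
  | c :: rest => if c == char then get_pos_pre rest char + 1 else 0

-- one iteration of A's for-loop; state = (ref_codon_list, ref_codon) (codons kept as char lists, joined at the end)
def aStep (st : List (List Char) × List Char) (r : Char) : List (List Char) × List Char :=
  let ref_codon := st.2 ++ [r]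
  let codon_core := PySem.Chars.replace ref_codon ['-'] []
  if PySem.Chars.len codon_core = 3 then
    let codon_pre := PySem.List.slice ref_codon none (some ((get_pos_pre ref_codon '-' : Nat) : Int))
    let this_codon := PySem.List.slice ref_codon (some ((get_pos_pre ref_codon '-' : Nat) : Int)) none
    let (lst, this_codon) :=
      if codon_pre ≠ [] then
        if st.1 ≠ [] then (st.1.dropLast ++ [st.1.getLastD [] ++ codon_pre], this_codon)
        else (st.1, ref_codon)
      else (st.1, this_codon)
    (lst ++ [this_codon], [])
  else (st.1, ref_codon)

def get_ref_codon_list (aligned_ref : String) : List String :=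
  ((aligned_ref.toList.foldl aStep ([], [])).1).map String.ofList

-- ===== PORT B =====
-- stage 1 step: over enumerate(aligned_ref), append i+1 to cuts after every 3rd non-dash char
def bCutStep (st : List Int × Nat) (p : Int × Char) : List Int × Nat :=
  if p.2 != '-' then
    if (st.2 + 1) % 3 == 0 then (st.1 ++ [p.1 + 1], st.2 + 1) else (st.1, st.2 + 1)
  else st

-- stage 3 step: move chunk's leading-dash run (lstrip difference) onto the previous output chunk
def bShift (out : List (List Char)) (chunk : List Char) : List (List Char) :=
  let stripped := chunk.dropWhile (· == '-')
  if out ≠ [] ∧ stripped ≠ chunk then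
    out.dropLast ++ [out.getLastD [] ++ chunk.take (chunk.length - stripped.length)] ++ [stripped]
  else out ++ [chunk]

-- stage 1 result (python's `cuts` list)
def bCuts (l : List Char) : List Int :=
  ((PySem.List.enumerate l).foldl bCutStep ([], 0)).1

def get_ref_codon_list_alt (aligned_ref : String) : List String :=
  (((((0 : Int) :: bCuts aligned_ref.toList).zip (bCuts aligned_ref.toList)).map
      (fun ab => PySem.List.slice aligned_ref.toList (some ab.1) (some ab.2))).foldl bShift []).map String.ofList

-- ===== PRECONDITION & SPEC =====
def Spec_get_ref_codon_list (aligned_ref : String) (out : List String) : Prop := out = get_ref_codon_list_alt aligned_ref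
instance (aligned_ref : String) (out : List String) : Decidable (Spec_get_ref_codon_list aligned_ref out) := by unfold Spec_get_ref_codon_list; infer_instance

-- ===== CLAIM (what is proved, stated in full; the proofs are below) =====
def Claim_equal_get_ref_codon_list : Prop := ∀ (aligned_ref : String), Dom_get_ref_codon_list aligned_ref → Spec_get_ref_codon_list aligned_ref (get_ref_codon_list aligned_ref)

-- ===== LEMMAS AND PROOFS =====

-- intermediate description shared by both proofs: the raw chunk list
def chunksRec : List Char → List Char → Nat → List (List Char)
  | [], _, _ => []
  | c :: t, buf, core =>
    if c != '-' then
      if core + 1 = 3 then (buf ++ [c]) :: chunksRec t [] 0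
      else chunksRec t (buf ++ [c]) (core + 1)
    else chunksRec t (buf ++ [c]) core

-- A's `''.join(ref_codon).replace('-','')` is the dash-filtered buffer
lemma replace_go_dash : ∀ (fuel : Nat) (l acc : List Char), l.length ≤ fuel →
    PySem.Chars.replace.go ['-'] [] fuel l acc = acc.reverse ++ l.filter (· != '-') := by
  intro fuel
  induction fuel with
  | zero =>
    intro l acc h
    have : l = [] := List.eq_nil_of_length_eq_zero (Nat.le_zero.mp h)
    subst this; simp [PySem.Chars.replace.go]
  | succ n ih =>
    intro l acc h
    cases l with
    | nil => simp [PySem.Chars.replace.go]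
    | cons c t =>
      simp only [PySem.Chars.replace.go]
      by_cases hc : c = '-'
      · subst hc
        have hp : List.isPrefixOf ['-'] ('-' :: t) = true := by simp [List.isPrefixOf]
        rw [if_pos hp]
        have hd : List.drop ['-'].length ('-' :: t) = t := rfl
        simp only [List.reverse_nil, List.nil_append]
        rw [hd, ih t acc (by simpa using Nat.le_of_succ_le_succ h)]
        simp
      · have hp : List.isPrefixOf ['-'] (c :: t) = false := by
          simp [List.isPrefixOf]; exact fun h' => hc h'.symm
        rw [if_neg (by simp [hp])]
        rw [ih t (c :: acc) (by simpa using Nat.le_of_succ_le_succ h)]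
        simp [hc]

lemma replace_dash (l : List Char) :
    PySem.Chars.replace l ['-'] [] = l.filter (· != '-') := by
  simp only [PySem.Chars.replace]
  rw [if_neg (by simp)]
  simpa using replace_go_dash l.length l [] (le_refl _)

lemma len_replace_dash (l : List Char) :
    PySem.Chars.len (PySem.Chars.replace l ['-'] []) = l.countP (· != '-') := by
  rw [replace_dash]
  simp [PySem.Chars.len_eq, List.countP_eq_length_filter]

-- get_pos_pre counts the leading dashes
lemma gpp_takeWhile (l : List Char) : get_pos_pre l '-' = (l.takeWhile (· == '-')).length := by
  induction l with
  | nil => rfl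
  | cons c t ih =>
    simp only [get_pos_pre, List.takeWhile_cons]
    by_cases hc : c = '-' <;> simp [hc, ih]

lemma drop_gpp (l : List Char) : l.drop (get_pos_pre l '-') = l.dropWhile (· == '-') := by
  induction l with
  | nil => rfl
  | cons c t ih =>
    simp only [get_pos_pre, List.dropWhile_cons]
    by_cases hc : c = '-' <;> simp [hc, ih]

lemma gpp_le (l : List Char) : get_pos_pre l '-' ≤ l.length := by
  rw [gpp_takeWhile]; exact (List.takeWhile_prefix _).length_le

-- A's flush block equals B's stage-3 step, for any chunk
lemma flush_eq (lst : List (List Char)) (chunk : List Char) :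
    ((if chunk.take (get_pos_pre chunk '-') ≠ [] then
        if lst ≠ [] then (lst.dropLast ++ [lst.getLastD [] ++ chunk.take (get_pos_pre chunk '-')],
                          chunk.drop (get_pos_pre chunk '-'))
        else (lst, chunk)
      else (lst, chunk.drop (get_pos_pre chunk '-'))) |> (fun p => p.1 ++ [p.2]))
    = bShift lst chunk := by
  unfold bShift
  set pos := get_pos_pre chunk '-' with hpos
  have hdw : chunk.dropWhile (· == '-') = chunk.drop pos := (drop_gpp chunk).symm
  by_cases h0 : pos = 0
  · simp only [hdw, h0, List.drop_zero, ne_eq, not_true_eq_false, and_false, if_neg,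
      not_false_eq_true, if_false]
    simp
  · have hle : pos ≤ chunk.length := gpp_le chunk
    have hne : chunk.take pos ≠ [] := by
      intro h
      rcases List.take_eq_nil_iff.mp h with h' | h'
      · exact h0 h'
      · rw [h'] at hle; simp at hle; exact h0 hle
    have hstr : chunk.drop pos ≠ chunk := by
      intro h
      have := congrArg List.length h
      simp [List.length_drop] at this
      omega
    have hk : chunk.length - (chunk.dropWhile (· == '-')).length = pos := by
      rw [hdw, List.length_drop]; omega
    by_cases hl : lst = []
    · simp [hne, hstr, hdw, hl]
    · simp [hne, hstr, hdw, hl, hk]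
      omega

-- L1: A's fused loop = fold of bShift over the raw chunk list
lemma loopA_eq : ∀ (l : List Char) (lst : List (List Char)) (codon : List Char) (core : Nat),
    core = codon.countP (· != '-') → core ≤ 2 →
    (l.foldl aStep (lst, codon)).1 = (chunksRec l codon core).foldl bShift lst := by
  intro l
  induction l with
  | nil => intro lst codon core _ _; rfl
  | cons r t ih =>
    intro lst codon core hcore hle
    simp only [List.foldl_cons, chunksRec]
    by_cases hr : r = '-'
    · have hA : aStep (lst, codon) r = (lst, codon ++ [r]) := by
        simp only [aStep, len_replace_dash]
        rw [if_neg (by simp [List.countP_append, hr]; omega)]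
      rw [hA]
      simp only [hr, bne_self_eq_false, if_false]
      exact ih _ _ _ (by simp [List.countP_append, hcore]) hle
    · have hcnt : (codon ++ [r]).countP (· != '-') = core + 1 := by
        simp [List.countP_append, hr, hcore]
      by_cases h3 : core + 1 = 3
      · have hA : aStep (lst, codon) r = (bShift lst (codon ++ [r]), []) := by
          simp only [aStep]
          rw [if_pos (by rw [len_replace_dash, hcnt, h3]; rfl)]
          rw [PySem.List.slice_to_natCast, PySem.List.slice_from_natCast]
          rw [← flush_eq lst (codon ++ [r])]
        rw [hA]
        simp only [hr, bne_iff_ne, ne_eq, not_false_eq_true, if_true, h3, if_pos, List.foldl_cons]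
        exact ih _ _ _ (by simp) (by omega)
      · have hA : aStep (lst, codon) r = (lst, codon ++ [r]) := by
          simp only [aStep, len_replace_dash]
          rw [if_neg (by rw [hcnt]; omega)]
        rw [hA]
        simp only [hr, bne_iff_ne, ne_eq, not_false_eq_true, if_true, h3, if_neg, if_false]
        exact ih _ _ _ hcnt.symm (by omega)

-- pure description of B's stage-1 fold
def cutsPure : List (Int × Char) → Nat → List Int
  | [], _ => []
  | p :: t, n =>
    if p.2 != '-' then
      if (n + 1) % 3 == 0 then (p.1 + 1) :: cutsPure t (n + 1) else cutsPure t (n + 1)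
    else cutsPure t n

lemma fold_cuts : ∀ (pairs : List (Int × Char)) (cs : List Int) (n : Nat),
    (pairs.foldl bCutStep (cs, n)).1 = cs ++ cutsPure pairs n := by
  intro pairs
  induction pairs with
  | nil => intro cs n; simp [cutsPure]
  | cons p t ih =>
    intro cs n
    simp only [List.foldl_cons, bCutStep, cutsPure]
    by_cases hd : (p.2 != '-') = true
    · by_cases h3 : ((n + 1) % 3 == 0) = true
      · simp [hd, h3, ih]
      · simp [hd, h3, ih]
    · simp [hd, ih]

-- L2: slicing the string at the cut indices produces the raw chunk list
lemma cuts_chunks : ∀ (t buf : List Char) (n a : Nat) (L : List Char),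
    L.drop a = buf ++ t → buf.countP (· != '-') = n % 3 →
    ((((a : Nat) : Int) :: cutsPure (PySem.List.enumerate t (((a : Nat) : Int) + buf.length)) n).zip
        (cutsPure (PySem.List.enumerate t (((a : Nat) : Int) + buf.length)) n)).map
      (fun ab => PySem.List.slice L (some ab.1) (some ab.2))
    = chunksRec t buf (n % 3) := by
  intro t
  induction t with
  | nil => intro buf n a L _ _; simp [PySem.List.enumerate_nil, cutsPure, chunksRec]
  | cons c t' ih =>
    intro buf n a L hdrop hcnt
    rw [PySem.List.enumerate_cons]
    simp only [cutsPure, chunksRec]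
    by_cases hc : c = '-'
    · subst hc
      simp only [bne_self_eq_false, Bool.false_eq_true, if_false]
      have h1 : ((a : Int) + (buf.length : Int)) + 1 = (a : Int) + ((buf ++ ['-']).length : Int) := by
        simp; push_cast; ring
      rw [h1]
      exact ih (buf ++ ['-']) n a L (by rw [hdrop]; simp) (by simp [List.countP_append, hcnt])
    · have hcb : (c != '-') = true := by simp [hc]
      simp only [hcb, if_true]
      by_cases h3 : (n + 1) % 3 = 0
      · have hcore : n % 3 + 1 = 3 := by omega
        simp only [h3, beq_self_eq_true, if_true, hcore, if_pos]
        -- head pair (a, a+buf.length+1); its slice is buf ++ [c]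
        have hcast : (a : Int) + (buf.length : Int) + 1 = (((a + buf.length + 1 : Nat)) : Int) := by
          push_cast; ring
        rw [List.zip_cons_cons, List.map_cons]
        have hhead : PySem.List.slice L (some ((a : Nat) : Int)) (some ((a : Int) + (buf.length : Int) + 1)) = buf ++ [c] := by
          rw [hcast, PySem.List.slice_natCast]
          have : a + buf.length + 1 - a = buf.length + 1 := by omega
          rw [this, hdrop]
          simp [List.take_append]
        rw [hhead]
        congr 1
        have := ih [] (n + 1) (a + buf.length + 1) L
          (by
            have h' : a + buf.length + 1 = a + (buf.length + 1) := by omega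
            rw [h', ← List.drop_drop, hdrop]
            simp [List.drop_append])
          (by simp [h3])
        rw [h3] at this
        simp only [List.length_nil, Nat.cast_zero, add_zero] at this
        rw [hcast]
        exact this
      · have hcore : (n % 3 + 1) = (n + 1) % 3 := by omega
        have h3' : ¬ (n % 3 + 1 = 3) := by omega
        simp only [h3, if_neg, h3', beq_iff_eq, if_false]
        have h1 : ((a : Int) + (buf.length : Int)) + 1 = (a : Int) + (((buf ++ [c]).length : Nat) : Int) := by
          push_cast; simp; ring
        rw [h1, hcore]
        exact ih (buf ++ [c]) (n + 1) a L (by rw [hdrop]; simp)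
          (by simp [List.countP_append, hc, hcnt, hcore])

-- ===== VERDICT (by name: the statement is the Claim_ definition above) =====
theorem get_ref_codon_list_spec : Claim_equal_get_ref_codon_list := by
  intro s _
  unfold Spec_get_ref_codon_list get_ref_codon_list get_ref_codon_list_alt bCuts
  rw [loopA_eq s.toList [] [] 0 (by simp) (by omega)]
  rw [fold_cuts]
  simp only [List.nil_append]
  have h := cuts_chunks s.toList [] 0 0 s.toList (by simp) (by simp)
  simp only [List.length_nil, Nat.cast_zero, Int.add_zero, add_zero, List.nil_append,
    Nat.zero_mod] at h
  rw [h]
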